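-- pv_equiv track=rewrite | github.com/VimeR2106/Python_labs | Lab_2/tasks.py | odd_divisors_count
-- ===== SOURCE A (Python) =====
-- def odd_divisors_count(n: int) -> int:
--     """
--     Возвращает количество различных нечётных делителей числа.
--
--     >>> odd_divisors_count(45)  # 1, 3, 5, 9, 15, 45
--     6
--     """
--     count = 0
--     d = 1
--     while d * d <= n:
--         if n % d == 0:
--             if d % 2 == 1:
--                 count += 1
--             other = n // d
--             if other != d and other % 2 == 1:
--                 count += 1
--         d += 1
--     return count
-- ===== SOURCE B (Python) =====
-- def odd_divisors_count(n: int) -> int: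
--     if n <= 0:
--         return 0
--     m = n
--     while m % 2 == 0:
--         m //= 2
--     total = 1
--     d = 3
--     while d * d <= m:
--         if m % d == 0:
--             e = 0
--             while m % d == 0:
--                 m //= d
--                 e += 1
--             total *= e + 1
--         d += 2
--     if m > 1:
--         total *= 2
--     return total
-- ===== Notes on version B (the rewrite author's own statement) =====
-- stated objective: alternative
-- what changed: B counts odd divisors from the prime factorization of n's odd part (stripping factors of 2, trial-dividing by odd d up to sqrt of the shrinking cofactor, multiplying exponent+1 per prime, times 2 for a leftover prime) instead of A's enumeration of all divisor pairs d, n//d for every d up to sqrt(n).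
import Mathlib
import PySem

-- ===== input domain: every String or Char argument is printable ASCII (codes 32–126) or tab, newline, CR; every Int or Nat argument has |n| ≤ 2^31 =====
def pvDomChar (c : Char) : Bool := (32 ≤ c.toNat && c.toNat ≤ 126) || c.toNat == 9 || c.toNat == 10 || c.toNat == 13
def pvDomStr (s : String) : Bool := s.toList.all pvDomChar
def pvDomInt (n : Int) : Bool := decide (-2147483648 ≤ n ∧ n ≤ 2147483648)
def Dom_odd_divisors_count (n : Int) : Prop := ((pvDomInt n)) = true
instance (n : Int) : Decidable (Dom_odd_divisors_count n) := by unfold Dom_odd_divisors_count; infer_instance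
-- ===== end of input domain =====

-- B re-implements the count from the prime factorization of n's odd part instead of
-- enumerating divisor pairs; equivalence of the two is proved for every n.
-- The `fuel` parameter of each loop is a totality guard only: it is always supplied
-- large enough that it never cuts a loop short (proved in the lemmas below).

-- ===== PORT A =====
-- while d*d <= n: if n % d == 0: …; d += 1   (literal transliteration)
def pvLoopA (fuel : Nat) (n d count : Int) : Int :=
  match fuel with
  | 0 => count
  | f + 1 =>
    if d * d ≤ n then
      let count1 :=
        if PySem.Int.mod n d = 0 then
          let count2 := if PySem.Int.mod d 2 = 1 then count + 1 else count
          let other := PySem.Int.floordiv n d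
          if other ≠ d ∧ PySem.Int.mod other 2 = 1 then count2 + 1 else count2
        else count
      pvLoopA f n (d + 1) count1
    else count

def odd_divisors_count (n : Int) : Int := pvLoopA (n.natAbs + 1) n 1 0

-- ===== PORT B =====
-- while m % 2 == 0: m //= 2
def pvStrip2 (fuel : Nat) (m : Int) : Int :=
  match fuel with
  | 0 => m
  | f + 1 =>
    if PySem.Int.mod m 2 = 0 then pvStrip2 f (PySem.Int.floordiv m 2) else m

-- inner while m % d == 0: m //= d; e += 1
def pvStripD (fuel : Nat) (d m e : Int) : Int × Int :=
  match fuel with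
  | 0 => (m, e)
  | f + 1 =>
    if PySem.Int.mod m d = 0 then pvStripD f d (PySem.Int.floordiv m d) (e + 1)
    else (m, e)

-- outer while d*d <= m: …; d += 2
def pvLoopB (fuel : Nat) (d m total : Int) : Int × Int :=
  match fuel with
  | 0 => (m, total)
  | f + 1 =>
    if d * d ≤ m then
      if PySem.Int.mod m d = 0 then
        let p := pvStripD m.natAbs d m 0
        pvLoopB f (d + 2) p.1 (total * (p.2 + 1))
      else pvLoopB f (d + 2) m total
    else (m, total)

def odd_divisors_count_alt (n : Int) : Int :=
  if n ≤ 0 then 0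
  else
    let m := pvStrip2 n.natAbs n
    let p := pvLoopB (m.natAbs + 1) 3 m 1
    if 1 < p.1 then p.2 * 2 else p.2

-- ===== PRECONDITION & SPEC =====
def Spec_odd_divisors_count (n : Int) (out : Int) : Prop := out = odd_divisors_count_alt n
instance (n : Int) (out : Int) : Decidable (Spec_odd_divisors_count n out) := by unfold Spec_odd_divisors_count; infer_instance

-- ===== CLAIM (what is proved, stated in full; the proofs are below) =====
def Claim_equal_odd_divisors_count : Prop := ∀ (n : Int), Dom_odd_divisors_count n → Spec_odd_divisors_count n (odd_divisors_count n)

-- ===== LEMMAS AND PROOFS =====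

-- the set of odd divisors of N not yet counted by A's loop when it reaches divisor candidate D
def pvOddSet (N D : ℕ) : Finset ℕ :=
  N.divisors.filter (fun e => e % 2 = 1 ∧ D ≤ e ∧ e * D ≤ N)

theorem pv_nat_mod_eq_zero {d M : ℕ} (h : d ∣ M) : M % d = 0 := by
  obtain ⟨k, rfl⟩ := h; simp [Nat.mul_mod_right]

theorem pvOddSet_empty (N D : ℕ) (h : ¬ D * D ≤ N) : pvOddSet N D = ∅ := by
  rw [Finset.eq_empty_iff_forall_notMem]
  intro e he
  rw [pvOddSet, Finset.mem_filter] at he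
  obtain ⟨_, hDe, heD⟩ := he.2
  exact h (le_trans (Nat.mul_le_mul_right D hDe) heD)

theorem pvOddSet_sdiff (N D : ℕ) (h1 : 1 ≤ D) (hDD : D * D ≤ N) :
    pvOddSet N D \ pvOddSet N (D + 1) =
      (if D ∣ N then ({D, N / D} : Finset ℕ).filter (fun e => e % 2 = 1) else ∅) := by
  have hN : 1 ≤ N := le_trans (by nlinarith : 1 ≤ D * D) hDD
  ext e
  rw [Finset.mem_sdiff, pvOddSet, pvOddSet, Finset.mem_filter, Finset.mem_filter,
    Nat.mem_divisors]
  constructor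
  · rintro ⟨⟨⟨hdvd, hN0⟩, hodd, hDe, heD⟩, hnot⟩
    have he1 : 1 ≤ e := Nat.pos_of_dvd_of_pos hdvd (by omega)
    have hkey : e = D ∨ (D ∣ N ∧ e = N / D) := by
      by_cases heq : e = D
      · exact Or.inl heq
      · right
        have hD1e : D + 1 ≤ e := by omega
        have hlt : N < e * (D + 1) := by
          by_contra hcon
          exact hnot ⟨⟨hdvd, hN0⟩, hodd, hD1e, by omega⟩
        obtain ⟨k, hk⟩ := hdvd
        have hkD : k = D := by
          have hl : e * D ≤ e * k := by omega
          have hr : e * k < e * (D + 1) := by omega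
          have h1' : D ≤ k := Nat.le_of_mul_le_mul_left hl (by omega)
          have h2' : k < D + 1 := Nat.lt_of_mul_lt_mul_left hr
          omega
        refine ⟨⟨e, by rw [hk, hkD]; ring⟩, ?_⟩
        rw [hk, hkD, Nat.mul_div_cancel e (by omega : 0 < D)]
    rcases hkey with rfl | ⟨hDN, rfl⟩
    · rw [if_pos hdvd, Finset.mem_filter]
      exact ⟨Finset.mem_insert_self _ _, hodd⟩
    · rw [if_pos hDN, Finset.mem_filter]
      exact ⟨by simp, hodd⟩
  · intro hmem
    by_cases hDN : D ∣ N
    · rw [if_pos hDN, Finset.mem_filter, Finset.mem_insert, Finset.mem_singleton] at hmem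
      obtain ⟨hor, hodd⟩ := hmem
      have hdivle : D ≤ N / D := (Nat.le_div_iff_mul_le (by omega : 0 < D)).mpr hDD
      have hNdD : N / D * D = N := Nat.div_mul_cancel hDN
      rcases hor with rfl | rfl
      · refine ⟨⟨⟨hDN, by omega⟩, hodd, le_refl _, hDD⟩, ?_⟩
        rintro ⟨_, _, habs, _⟩
        omega
      · refine ⟨⟨⟨Nat.div_dvd_of_dvd hDN, by omega⟩, hodd, hdivle, by omega⟩, ?_⟩
        rintro ⟨_, _, hge, hle⟩
        have : N / D * (D + 1) = N + N / D := by rw [Nat.mul_add, hNdD]; ring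
        omega
    · rw [if_neg hDN] at hmem
      exact absurd hmem (Finset.notMem_empty e)

theorem pvOddSet_step (N D : ℕ) (h1 : 1 ≤ D) (hDD : D * D ≤ N) :
    (pvOddSet N D).card = (pvOddSet N (D + 1)).card +
      (if D ∣ N then
        (if D % 2 = 1 then 1 else 0) +
        (if N / D ≠ D ∧ (N / D) % 2 = 1 then 1 else 0)
       else 0) := by
  have hsub : pvOddSet N (D + 1) ⊆ pvOddSet N D := by
    intro e he
    rw [pvOddSet, Finset.mem_filter] at he ⊢
    obtain ⟨hdiv, hodd, hDe, heD⟩ := he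
    refine ⟨hdiv, hodd, by omega, le_trans ?_ heD⟩
    exact Nat.mul_le_mul_left e (by omega)
  have hcard := Finset.card_sdiff_add_card_eq_card hsub
  rw [pvOddSet_sdiff N D h1 hDD] at hcard
  by_cases hDN : D ∣ N
  · rw [if_pos hDN] at hcard ⊢
    by_cases heq : N / D = D
    · have hset : ({D, N / D} : Finset ℕ) = {D} := by rw [heq]; simp
      rw [hset, Finset.filter_singleton] at hcard
      rw [if_neg (show ¬(N / D ≠ D ∧ N / D % 2 = 1) from fun hcon => hcon.1 heq)]
      by_cases hodd : D % 2 = 1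
      · rw [if_pos hodd]
        rw [if_pos hodd] at hcard
        simp at hcard
        omega
      · rw [if_neg hodd]
        rw [if_neg hodd] at hcard
        simp at hcard
        omega
    · have hcards : (({D, N / D} : Finset ℕ).filter (fun e => e % 2 = 1)).card =
          (if D % 2 = 1 then 1 else 0) + (if N / D % 2 = 1 then 1 else 0) := by
        rw [Finset.filter_insert, Finset.filter_singleton]
        by_cases h1' : D % 2 = 1 <;> by_cases h2' : N / D % 2 = 1 <;>
          simp [h1', h2', Finset.card_insert_of_notMem, Ne.symm heq]
      rw [hcards] at hcard
      by_cases h2' : N / D % 2 = 1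
      · rw [if_pos (show N / D ≠ D ∧ N / D % 2 = 1 from ⟨heq, h2'⟩)]
        by_cases h1' : D % 2 = 1 <;> simp [h1', h2'] at hcard ⊢ <;> omega
      · rw [if_neg (show ¬(N / D ≠ D ∧ N / D % 2 = 1) from fun hcon => h2' hcon.2)]
        by_cases h1' : D % 2 = 1 <;> simp [h1', h2'] at hcard ⊢ <;> omega
  · rw [if_neg hDN] at hcard ⊢
    simp at hcard
    omega

theorem pvLoopA_inv_aux : ∀ fuel N D : ℕ, ∀ c : Int, N + 1 - D ≤ fuel → 1 ≤ D → 1 ≤ N →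
    pvLoopA fuel (N : Int) (D : Int) c = c + ((pvOddSet N D).card : Int) := by
  intro fuel
  induction fuel with
  | zero =>
    intro N D c hf hD hN
    have hND : N < D := by omega
    have hg : ¬ D * D ≤ N := by nlinarith
    rw [pvOddSet_empty N D hg]
    simp [pvLoopA]
  | succ fuel ih =>
    intro N D c hf hD hN
    by_cases hg : D * D ≤ N
    · rw [pvLoopA, if_pos (by exact_mod_cast hg :
        ((D : Int) * (D : Int) ≤ (N : Int)))]
      have hDN : D ≤ N := le_trans (by nlinarith) hg
      have hstep : ((D : Int)) + 1 = ((D + 1 : ℕ) : Int) := by push_cast; ring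
      have hmodN : PySem.Int.mod (N : Int) (D : Int) = ((N % D : ℕ) : Int) :=
        PySem.Int.mod_natCast N D
      have hmodD : PySem.Int.mod (D : Int) 2 = ((D % 2 : ℕ) : Int) := by
        rw [show ((2:Int)) = ((2:ℕ):Int) by norm_num, PySem.Int.mod_natCast]
      have hflo : PySem.Int.floordiv (N : Int) (D : Int) = ((N / D : ℕ) : Int) :=
        PySem.Int.floordiv_natCast N D
      have hmodND : PySem.Int.mod ((N / D : ℕ) : Int) 2 = ((N / D % 2 : ℕ) : Int) := by
        rw [show ((2:Int)) = ((2:ℕ):Int) by norm_num, PySem.Int.mod_natCast]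
      have hrec : ∀ c' : Int, pvLoopA fuel (N : Int) ((D : Int) + 1) c' =
          c' + ((pvOddSet N (D + 1)).card : Int) := by
        intro c'
        rw [hstep]
        exact ih N (D + 1) c' (by omega) (by omega) hN
      have hkey := pvOddSet_step N D hD hg
      by_cases hdvd : D ∣ N
      · have hmod0 : ((N % D : ℕ) : Int) = 0 := by
          rw [pv_nat_mod_eq_zero hdvd]; norm_num
        rw [hmodN]
        simp only [hmod0, hmodD, hflo, hmodND, if_pos]
        have hiffD : (((D % 2 : ℕ) : Int) = 1) ↔ (D % 2 = 1) := by
          constructor <;> intro h <;> exact_mod_cast h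
        have hiffO : ((((N / D) : ℕ) : Int) ≠ (D : Int) ∧ (((N / D % 2 : ℕ)) : Int) = 1) ↔
            (N / D ≠ D ∧ N / D % 2 = 1) := by
          constructor <;> rintro ⟨ha, hb⟩ <;>
            exact ⟨by intro hc; exact ha (by exact_mod_cast hc), by exact_mod_cast hb⟩
        rw [if_pos hdvd] at hkey
        by_cases h1' : D % 2 = 1 <;> by_cases h2' : N / D ≠ D ∧ N / D % 2 = 1
        · rw [if_pos (hiffD.mpr h1'), if_pos (hiffO.mpr h2'), hrec]
          rw [if_pos h1', if_pos h2'] at hkey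
          omega
        · rw [if_pos (hiffD.mpr h1'), if_neg (fun hc => h2' (hiffO.mp hc)), hrec]
          rw [if_pos h1', if_neg h2'] at hkey
          omega
        · rw [if_neg (fun hc => h1' (hiffD.mp hc)), if_pos (hiffO.mpr h2'), hrec]
          rw [if_neg h1', if_pos h2'] at hkey
          omega
        · rw [if_neg (fun hc => h1' (hiffD.mp hc)), if_neg (fun hc => h2' (hiffO.mp hc)), hrec]
          rw [if_neg h1', if_neg h2'] at hkey
          omega
      · have hmodne : ¬ (PySem.Int.mod (N : Int) (D : Int) = 0) := by
          rw [hmodN]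
          intro hc
          exact hdvd (Nat.dvd_of_mod_eq_zero (by exact_mod_cast hc))
        rw [if_neg hmodne, hrec]
        rw [if_neg hdvd] at hkey
        omega
    · rw [pvLoopA, if_neg (by exact_mod_cast hg :
        ¬ ((D : Int) * (D : Int) ≤ (N : Int))), pvOddSet_empty N D hg]
      simp

theorem pvLoopA_inv (fuel N D : ℕ) (c : Int) (hf : N + 1 - D ≤ fuel) (hD : 1 ≤ D)
    (hN : 1 ≤ N) :
    pvLoopA fuel (N : Int) (D : Int) c = c + ((pvOddSet N D).card : Int) :=
  pvLoopA_inv_aux fuel N D c hf hD hN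

theorem pvOddSet_one (N : ℕ) (hN : 1 ≤ N) :
    pvOddSet N 1 = N.divisors.filter (fun e => e % 2 = 1) := by
  unfold pvOddSet
  apply Finset.filter_congr
  intro e he
  rw [Nat.mem_divisors] at he
  have h1 : 1 ≤ e := Nat.pos_of_dvd_of_pos he.1 (by omega)
  have h2 : e ≤ N := Nat.le_of_dvd (by omega) he.1
  simp only [mul_one]
  constructor
  · intro h; exact h.1
  · intro h; exact ⟨h, h1, h2⟩

theorem pvStrip2_spec : ∀ fuel M : ℕ, M ≤ fuel → 1 ≤ M →
    ∃ (v R : ℕ), pvStrip2 fuel (M : Int) = (R : Int) ∧ M = 2 ^ v * R ∧ R % 2 = 1 := by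
  intro fuel
  induction fuel with
  | zero => intro M h0 h1; exact absurd h0 (by omega)
  | succ f ih =>
    intro M hMf hM
    have hmodc : PySem.Int.mod (M : Int) 2 = ((M % 2 : ℕ) : Int) := by
      rw [show ((2 : Int)) = ((2 : ℕ) : Int) by norm_num, PySem.Int.mod_natCast]
    rw [pvStrip2]
    by_cases hpar : M % 2 = 0
    · have hcond : PySem.Int.mod (M : Int) 2 = 0 := by rw [hmodc, hpar]; norm_num
      rw [if_pos hcond, show ((2 : Int)) = ((2 : ℕ) : Int) by norm_num,
        PySem.Int.floordiv_natCast]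
      obtain ⟨v, R, h1, h2, h3⟩ := ih (M / 2) (by omega) (by omega)
      refine ⟨v + 1, R, h1, ?_, h3⟩
      calc M = 2 * (M / 2) := by omega
        _ = 2 * (2 ^ v * R) := by rw [h2]
        _ = 2 ^ (v + 1) * R := by ring
    · have hcond : ¬ (PySem.Int.mod (M : Int) 2 = 0) := by
        rw [hmodc]
        intro hc
        exact hpar (by exact_mod_cast hc)
      rw [if_neg hcond]
      exact ⟨0, M, rfl, by omega, by omega⟩

theorem pvOddFilter_eq (v R : ℕ) (hR : R % 2 = 1) :
    ((2 ^ v * R).divisors.filter (fun e => e % 2 = 1)) = R.divisors := by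
  have hR0 : R ≠ 0 := by omega
  ext e
  rw [Finset.mem_filter, Nat.mem_divisors, Nat.mem_divisors]
  constructor
  · rintro ⟨⟨hdvd, _⟩, hodd⟩
    refine ⟨?_, hR0⟩
    have hcop : Nat.Coprime e 2 :=
      ((Nat.Prime.coprime_iff_not_dvd Nat.prime_two).mpr (by rintro ⟨t, ht⟩; omega)).symm
    exact (Nat.Coprime.pow_right v hcop).dvd_of_dvd_mul_left hdvd
  · rintro ⟨hdvd, _⟩
    have hNe : 2 ^ v * R ≠ 0 := by positivity
    refine ⟨⟨hdvd.mul_left _, hNe⟩, ?_⟩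
    rcases Nat.even_or_odd e with he | he
    · exfalso
      have h2R : 2 ∣ R := dvd_trans he.two_dvd hdvd
      omega
    · exact Nat.odd_iff.mp he

theorem pvStripD_spec (d : ℕ) (hd : 2 ≤ d) :
    ∀ fuel M : ℕ, ∀ e : Int, M ≤ fuel → 1 ≤ M →
      ∃ k R : ℕ, pvStripD fuel (d : Int) (M : Int) e = ((R : Int), e + (k : Int)) ∧
        M = d ^ k * R ∧ ¬ d ∣ R ∧ 1 ≤ R := by
  intro fuel
  induction fuel with
  | zero => intro M e h0 h1; exact absurd h0 (by omega)
  | succ f ih =>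
    intro M e hMf hM
    have hmodc : PySem.Int.mod (M : Int) (d : Int) = ((M % d : ℕ) : Int) :=
      PySem.Int.mod_natCast M d
    rw [pvStripD]
    by_cases hdvd : d ∣ M
    · have hcond : PySem.Int.mod (M : Int) (d : Int) = 0 := by
        rw [hmodc, pv_nat_mod_eq_zero hdvd]; norm_num
      rw [if_pos hcond, PySem.Int.floordiv_natCast M d]
      have hdivlt : M / d < M := Nat.div_lt_self (by omega) (by omega)
      obtain ⟨k, R, h1, h2, h3, h4⟩ := ih (M / d) (e + 1) (by omega)
        ((Nat.one_le_div_iff (by omega)).mpr (Nat.le_of_dvd (by omega) hdvd))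
      refine ⟨k + 1, R, ?_, ?_, h3, h4⟩
      · rw [h1]; congr 1; push_cast; ring
      · have hMd : M = d * (M / d) := (Nat.mul_div_cancel' hdvd).symm
        rw [hMd, h2, pow_succ]; ring
    · have hcond : ¬ (PySem.Int.mod (M : Int) (d : Int) = 0) := by
        rw [hmodc]
        intro hc
        exact hdvd (Nat.dvd_of_mod_eq_zero (by exact_mod_cast hc))
      rw [if_neg hcond]
      exact ⟨0, M, by simp, by simp, hdvd, hM⟩

theorem pvLoopB_tail (M d : ℕ) (acc : Int) (hM : 1 ≤ M) (hd : 2 ≤ d)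
    (hg : ¬ d * d ≤ M) (hmin : ∀ p : ℕ, p.Prime → p ∣ M → d ≤ p) :
    (if (1 : Int) < (M : Int) then acc * 2 else acc) = acc * (M.divisors.card : Int) := by
  by_cases hM1 : M = 1
  · subst hM1
    rw [if_neg (by norm_num)]
    simp
  · have hM2 : 2 ≤ M := by omega
    have hp : M.Prime := by
      by_contra hnp
      have hsq := Nat.minFac_sq_le_self (by omega : 0 < M) hnp
      have hge := hmin M.minFac (Nat.minFac_prime (by omega)) (Nat.minFac_dvd M)
      rw [pow_two] at hsq
      exact hg (le_trans (Nat.mul_le_mul hge hge) hsq)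
    have hcard : M.divisors.card = 2 := by
      rw [Nat.Prime.divisors hp, Finset.card_insert_of_notMem (by simp; omega),
        Finset.card_singleton]
    rw [hcard, if_pos (by exact_mod_cast hM2 : (1 : Int) < (M : Int))]
    norm_num

theorem pvLoopB_spec_aux : ∀ fuel : ℕ, ∀ M d : ℕ, ∀ acc : Int, M + 1 - d ≤ fuel →
    1 ≤ M → 3 ≤ d → d % 2 = 1 → (∀ p : ℕ, p.Prime → p ∣ M → d ≤ p) →
    (if 1 < (pvLoopB fuel (d : Int) (M : Int) acc).1 then
      (pvLoopB fuel (d : Int) (M : Int) acc).2 * 2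
     else (pvLoopB fuel (d : Int) (M : Int) acc).2) = acc * (M.divisors.card : Int) := by
  intro fuel
  induction fuel with
  | zero =>
    intro M d acc hf hM hd hodd hmin
    have hdM : M < d := by omega
    have hg : ¬ d * d ≤ M := by nlinarith
    simp only [pvLoopB]
    exact pvLoopB_tail M d acc hM (by omega) hg hmin
  | succ fuel ih =>
    intro M d acc hf hM hd hodd hmin
    by_cases hg : d * d ≤ M
    · have hdM : d ≤ M := le_trans (by nlinarith) hg
      rw [pvLoopB, if_pos (by exact_mod_cast hg : ((d : Int) * (d : Int) ≤ (M : Int)))]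
      rw [Int.natAbs_natCast]
      have hmodc : PySem.Int.mod (M : Int) (d : Int) = ((M % d : ℕ) : Int) :=
        PySem.Int.mod_natCast M d
      have hstep : ((d : Int)) + 2 = ((d + 2 : ℕ) : Int) := by push_cast; ring
      by_cases hdvd : d ∣ M
      · -- d is prime here
        have hdp : d.Prime := by
          rw [Nat.prime_def_minFac]
          refine ⟨by omega, ?_⟩
          have hple := hmin d.minFac (Nat.minFac_prime (by omega : d ≠ 1))
            (dvd_trans (Nat.minFac_dvd d) hdvd)
          have := Nat.minFac_le (by omega : 0 < d)
          omega
        have hcond : PySem.Int.mod (M : Int) (d : Int) = 0 := by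
          rw [hmodc, pv_nat_mod_eq_zero hdvd]; norm_num
        rw [if_pos hcond]
        obtain ⟨k, R, hsd, hMeq, hndvd, hR1⟩ := pvStripD_spec d (by omega) M M 0 le_rfl hM
        rw [hsd]
        simp only [zero_add]
        have hRdvd : R ∣ M := ⟨d ^ k, by rw [hMeq]; ring⟩
        have hRM : R ≤ M := Nat.le_of_dvd (by omega) hRdvd
        have hmin' : ∀ p : ℕ, p.Prime → p ∣ R → d + 2 ≤ p := by
          intro p hp hpR
          have hpd := hmin p hp (hpR.trans hRdvd)
          have hpne : p ≠ d := by
            rintro rfl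
            exact hndvd hpR
          have hpne1 : p ≠ d + 1 := by
            rintro rfl
            have h2 : 2 ∣ d + 1 := Nat.dvd_of_mod_eq_zero (by omega)
            have := (Nat.Prime.eq_one_or_self_of_dvd hp) 2 h2
            omega
          omega
        have hrec := ih R (d + 2) (acc * ((k : Int) + 1)) (by omega) hR1 (by omega)
          (by omega) hmin'
        rw [hstep, hrec]
        have hcop : Nat.Coprime (d ^ k) R := (Nat.Prime.coprime_iff_not_dvd hdp).mpr hndvd |>.pow_left k
        have htau : M.divisors.card = (k + 1) * R.divisors.card := by
          rw [hMeq, Nat.Coprime.card_divisors_mul hcop]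
          congr 1
          rw [Nat.divisors_prime_pow hdp]
          simp
        rw [htau]
        push_cast
        ring
      · have hcond : ¬ (PySem.Int.mod (M : Int) (d : Int) = 0) := by
          rw [hmodc]
          intro hc
          exact hdvd (Nat.dvd_of_mod_eq_zero (by exact_mod_cast hc))
        rw [if_neg hcond]
        have hmin' : ∀ p : ℕ, p.Prime → p ∣ M → d + 2 ≤ p := by
          intro p hp hpM
          have hpd := hmin p hp hpM
          have hpne : p ≠ d := by
            rintro rfl
            exact hdvd hpM
          have hpne1 : p ≠ d + 1 := by
            rintro rfl
            have h2 : 2 ∣ d + 1 := Nat.dvd_of_mod_eq_zero (by omega)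
            have := (Nat.Prime.eq_one_or_self_of_dvd hp) 2 h2
            omega
          omega
        have hrec := ih M (d + 2) acc (by omega) hM (by omega) (by omega) hmin'
        rw [hstep]
        exact hrec
    · rw [pvLoopB, if_neg (by exact_mod_cast hg :
        ¬ ((d : Int) * (d : Int) ≤ (M : Int)))]
      exact pvLoopB_tail M d acc hM (by omega) hg hmin

theorem pvLoopB_spec (fuel M d : ℕ) (acc : Int) (hf : M + 1 - d ≤ fuel) (hM : 1 ≤ M)
    (hd : 3 ≤ d) (hodd : d % 2 = 1) (hmin : ∀ p : ℕ, p.Prime → p ∣ M → d ≤ p) :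
    (if 1 < (pvLoopB fuel (d : Int) (M : Int) acc).1 then
      (pvLoopB fuel (d : Int) (M : Int) acc).2 * 2
     else (pvLoopB fuel (d : Int) (M : Int) acc).2) = acc * (M.divisors.card : Int) :=
  pvLoopB_spec_aux fuel M d acc hf hM hd hodd hmin

theorem pv_main (N : ℕ) (hN : 1 ≤ N) :
    odd_divisors_count (N : Int) = odd_divisors_count_alt (N : Int) := by
  unfold odd_divisors_count odd_divisors_count_alt
  rw [if_neg (by omega : ¬ ((N : Int) ≤ 0))]
  rw [Int.natAbs_natCast]
  obtain ⟨v, R, hs, hNeq, hRodd⟩ := pvStrip2_spec N N le_rfl hN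
  simp only [hs, Int.natAbs_natCast]
  have hR1 : 1 ≤ R := by omega
  have hmin : ∀ p : ℕ, p.Prime → p ∣ R → 3 ≤ p := by
    intro p hp hpR
    have h2 := hp.two_le
    by_cases hp2 : p = 2
    · subst hp2
      obtain ⟨t, ht⟩ := hpR
      omega
    · omega
  have hloop := pvLoopB_spec (R + 1) R 3 1 (by omega) hR1 le_rfl rfl hmin
  have hA := pvLoopA_inv (N + 1) N 1 0 (by omega) le_rfl hN
  rw [pvOddSet_one N hN] at hA
  have hfc : (N.divisors.filter (fun e => e % 2 = 1)).card = R.divisors.card := by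
    rw [hNeq, pvOddFilter_eq v R hRodd]
  rw [hfc] at hA
  rw [show ((3 : Int)) = ((3 : ℕ) : Int) by norm_num, hloop]
  rw [show ((1 : Int)) = ((1 : ℕ) : Int) by norm_num]
  rw [hA]
  ring

-- ===== VERDICT (by name: the statement is the Claim_ definition above) =====
theorem odd_divisors_count_spec : Claim_equal_odd_divisors_count := by
  intro n _
  unfold Spec_odd_divisors_count
  rcases (by omega : n ≤ 0 ∨ 0 < n) with h | h
  · have hA : odd_divisors_count n = 0 := by
      unfold odd_divisors_count
      rw [pvLoopA, if_neg (by omega : ¬((1:Int) * 1 ≤ n))]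
    have hB : odd_divisors_count_alt n = 0 := by
      unfold odd_divisors_count_alt
      simp [h]
    rw [hA, hB]
  · have : n = ((n.toNat : ℕ) : Int) := by omega
    rw [this]
    exact pv_main n.toNat (by omega)
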